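-- pv_equiv track=rewrite | github.com/zlebnik/yap | remove_zeroes.py | remove_zeroes_stable
-- ===== SOURCE A (Python) =====
-- def remove_zeroes_stable(a):
--     last_non_zero_index = len(a) - 1
--     while last_non_zero_index > 0 and a[last_non_zero_index] == 0:
--         last_non_zero_index -= 1
--     # проверяем, что список пуст
--     if last_non_zero_index <= 0:
--         a.clear()
--         return a
--
--     i = 0
--     while i < last_non_zero_index + 1:
--         if a[i] == 0:
--             j = i
--             while j < last_non_zero_index:
--                 b = a[j]
--                 a[j] = a[j + 1]
--                 a[j + 1] = b
--                 j += 1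
--             while last_non_zero_index > i and a[last_non_zero_index] == 0:
--                 last_non_zero_index -= 1
--         else:
--             # здесь приращение i только в случае несмены мест, потому что 2 нуля могут быть подряд
--             i += 1
--
--     del a[last_non_zero_index + 1:]
--
--     return a
-- ===== SOURCE B (Python) =====
-- def remove_zeroes_stable(a):
--     # Single pass: keep nonzero elements in order (stable), write back in place.
--     a[:] = [x for x in a if x != 0]
--     return a
-- ===== Notes on version B (the rewrite author's own statement) =====
-- stated objective: simpler
-- what changed: Replaces the bubble-a-zero-to-the-end in-place compaction (nested while loops with a shrinking last-nonzero index, quadratic when zeros are present) by a single stable filter pass written back into the list.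
-- intended difference: On nonempty lists whose head is nonzero and whose tail is all zeros (e.g. [5] or [3,0,0]) A's 'last_non_zero_index <= 0' check wrongly clears the list and returns an empty list, while B returns [head], the intended stable removal of zeros. — e.g. on remove_zeroes_stable([5, 0]): A returns [], B returns [5]
import Mathlib
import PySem

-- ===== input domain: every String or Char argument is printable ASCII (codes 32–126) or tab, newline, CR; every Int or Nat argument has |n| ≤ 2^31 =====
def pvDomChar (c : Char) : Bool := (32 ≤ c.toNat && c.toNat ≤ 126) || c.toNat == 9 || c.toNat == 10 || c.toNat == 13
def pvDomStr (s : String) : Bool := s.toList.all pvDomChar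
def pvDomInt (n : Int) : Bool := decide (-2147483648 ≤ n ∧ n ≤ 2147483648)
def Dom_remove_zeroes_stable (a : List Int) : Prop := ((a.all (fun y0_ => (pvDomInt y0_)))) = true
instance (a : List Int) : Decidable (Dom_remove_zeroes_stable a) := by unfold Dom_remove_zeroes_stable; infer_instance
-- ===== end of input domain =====

-- B replaces A's bubble-zeros-to-the-end in-place compaction (nested while loops) by one stable
-- filter pass, a simpler single-pass decomposition (equivalence claimed about the RETURN value —
-- in Python both also rebind the argument list's contents, A by element swaps, B by slice assignment).
-- A wrongly clears lists whose nonzero head is followed only by zeros; B keeps the head (see D_ below).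


-- ===== PORT A =====

-- `while last_non_zero_index > 0 and a[last_non_zero_index] == 0:` (lnz is a Python int; the
-- element read a[lnz] only happens under lnz > 0 and lnz ≤ len-1, so getD at lnz.toNat is exact)
def pvA_shrink0 (l : List Int) (lnz : Int) : Int :=
  if h : 0 < lnz ∧ l.getD lnz.toNat 0 = 0 then pvA_shrink0 l (lnz - 1) else lnz
termination_by lnz.toNat
decreasing_by omega

-- inner `while j < last_non_zero_index:` adjacent-swap loop; the temporary `b = a[j]` is inlined
def pvA_bubble (l : List Int) (j lnz : Nat) : List Int :=
  if h : j < lnz then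
    pvA_bubble ((l.set j (l.getD (j + 1) 0)).set (j + 1) (l.getD j 0)) (j + 1) lnz
  else l
termination_by lnz - j

-- inner `while last_non_zero_index > i and a[last_non_zero_index] == 0:` loop
def pvA_shrink (l : List Int) (i lnz : Nat) : Nat :=
  if h : i < lnz ∧ l.getD lnz 0 = 0 then pvA_shrink l i (lnz - 1) else lnz
termination_by lnz

-- the main `while i < last_non_zero_index + 1:` loop over the state (a, i, lnz)
def pvA_loop (l : List Int) (i lnz : Nat) : List Int × Nat :=
  if hi : i < lnz + 1 then
    if l.getD i 0 = 0 then
      if h : pvA_shrink (pvA_bubble l i lnz) i lnz < lnz then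
        pvA_loop (pvA_bubble l i lnz) i (pvA_shrink (pvA_bubble l i lnz) i lnz)
      else (pvA_bubble l i lnz, pvA_shrink (pvA_bubble l i lnz) i lnz)
        -- totality guard: here Python's loop would make no further progress; unreachable from the entry point
    else pvA_loop l (i + 1) lnz
  else (l, lnz)
termination_by (lnz + 1) - i

def remove_zeroes_stable (a : List Int) : List Int :=
  if pvA_shrink0 a ((a.length : Int) - 1) ≤ 0 then []        -- a.clear(); return a
  else
    (pvA_loop a 0 (pvA_shrink0 a ((a.length : Int) - 1)).toNat).1.take
      ((pvA_loop a 0 (pvA_shrink0 a ((a.length : Int) - 1)).toNat).2 + 1)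
        -- del a[last_non_zero_index + 1:]; return a

-- ===== PORT B =====
def remove_zeroes_stable_alt (a : List Int) : List Int := a.filter (fun x => x != 0)

-- ===== PRECONDITION & SPEC =====
-- On nonempty lists whose nonzero head is followed only by zeros, A's `last_non_zero_index <= 0`
-- clear check wrongly fires and A returns []; B returns [head], the intended stable zero removal.
def D_remove_zeroes_stable (a : List Int) : Prop :=
  a ≠ [] ∧ a.headI ≠ 0 ∧ ∀ x ∈ a.tail, x = 0
instance (a : List Int) : Decidable (D_remove_zeroes_stable a) := by
  unfold D_remove_zeroes_stable; infer_instance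

def Spec_remove_zeroes_stable (a : List Int) (out : List Int) : Prop :=
  ¬ D_remove_zeroes_stable a → out = remove_zeroes_stable_alt a
instance (a : List Int) (out : List Int) : Decidable (Spec_remove_zeroes_stable a out) := by
  unfold Spec_remove_zeroes_stable; infer_instance

def pvDiffWitness_remove_zeroes_stable : List Int := [5, 0]
def pvDiffWitnessOut_remove_zeroes_stable : (List Int) × (List Int) := ([], [5])

-- ===== CLAIM (what is proved, stated in full; the proofs are below) =====
def Claim_unchanged_remove_zeroes_stable : Prop := ∀ (a : List Int), Dom_remove_zeroes_stable a → Spec_remove_zeroes_stable a (remove_zeroes_stable a)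
def Claim_changed_remove_zeroes_stable : Prop := Dom_remove_zeroes_stable (pvDiffWitness_remove_zeroes_stable) ∧ D_remove_zeroes_stable (pvDiffWitness_remove_zeroes_stable) ∧ remove_zeroes_stable (pvDiffWitness_remove_zeroes_stable) = pvDiffWitnessOut_remove_zeroes_stable.1 ∧ remove_zeroes_stable_alt (pvDiffWitness_remove_zeroes_stable) = pvDiffWitnessOut_remove_zeroes_stable.2 ∧ pvDiffWitnessOut_remove_zeroes_stable.1 ≠ pvDiffWitnessOut_remove_zeroes_stable.2
def Claim_exact_remove_zeroes_stable : Prop := ∀ (a : List Int), Dom_remove_zeroes_stable a → D_remove_zeroes_stable a → remove_zeroes_stable a ≠ remove_zeroes_stable_alt a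

-- ===== LEMMAS AND PROOFS =====

theorem shrink0_spec (l : List Int) (lnz : Int) :
    pvA_shrink0 l lnz ≤ lnz ∧
    (0 < pvA_shrink0 l lnz → l.getD (pvA_shrink0 l lnz).toNat 0 ≠ 0) ∧
    (∀ k : Int, pvA_shrink0 l lnz < k → k ≤ lnz → l.getD k.toNat 0 = 0) := by
  fun_induction pvA_shrink0 l lnz with
  | case1 lnz h ih =>
    refine ⟨by omega, ih.2.1, ?_⟩
    intro k hk1 hk2
    rcases lt_or_eq_of_le hk2 with h' | h'
    · exact ih.2.2 k hk1 (by omega)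
    · rw [h']; exact h.2
  | case2 lnz h =>
    refine ⟨le_refl _, ?_, by omega⟩
    intro hpos hz
    exact h ⟨hpos, hz⟩

theorem swap_decomp (l : List Int) (j : Nat) (h : j + 1 < l.length) :
    (l.set j (l.getD (j+1) 0)).set (j+1) (l.getD j 0)
      = l.take j ++ l[j+1] :: l[j] :: l.drop (j+2) := by
  have hj : j < l.length := by omega
  rw [List.getD_eq_getElem l 0 h, List.getD_eq_getElem l 0 hj]
  rw [List.set_eq_take_cons_drop _ hj]
  rw [List.set_eq_take_cons_drop _ (by simp; omega)]
  simp only [List.take_append, List.drop_append, List.take_take, List.length_take,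
    Nat.min_eq_left hj.le, Nat.min_eq_left (Nat.le_succ_of_le hj.le)]
  have e0 : min (j+1) j = j := by omega
  have e1 : j + 1 - j = 1 := by omega
  have e2 : j + 1 + 1 - j = 2 := by omega
  rw [e0, e1, e2]
  have e3 : List.drop (j+1+1) (List.take j l) = [] := by
    simp [List.drop_eq_nil_iff]; omega
  rw [e3]
  simp [List.drop_drop]

theorem bubble_spec : ∀ (l : List Int) (j lnz : Nat), j ≤ lnz → lnz < l.length →
    pvA_bubble l j lnz
      = l.take j ++ (l.drop (j+1)).take (lnz - j) ++ l.getD j 0 :: l.drop (lnz+1) := by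
  intro l j lnz hj hlnz
  revert hj hlnz
  fun_induction pvA_bubble l j lnz
  · rename_i l j h ih
    intro hj hlnz
    have hj1 : j + 1 < l.length := by omega
    rw [swap_decomp l j hj1] at ih ⊢
    have hlen : (l.take j ++ l[j+1] :: l[j] :: l.drop (j+2)).length = l.length := by
      simp; omega
    rw [ih (by omega) (by rw [hlen]; omega)]
    have h1 : (l.take j).length = j := by simp; omega
    have e2 : j + 1 - j = 1 := by omega
    have e3 : j + 1 + 1 - j = 2 := by omega
    have e4 : List.drop (j+1+1) (List.take j l) = [] := by
      simp [List.drop_eq_nil_iff]; omega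
    have e5 : List.take (j+1) (List.take j l) = List.take j l := by
      rw [List.take_take]; congr 1; omega
    simp only [List.take_append, List.drop_append, List.getD_eq_getElem?_getD,
      List.getElem?_append, h1, e2, e3, e4, e5]
    have e6 : List.drop (lnz+1) (List.take j l) = [] := by
      simp [List.drop_eq_nil_iff]; omega
    have e7 : lnz + 1 - j = lnz - j - 1 + 2 := by omega
    have e8 : lnz - j = lnz - j - 1 + 1 := by omega
    have hjl : j < l.length := by omega
    rw [e6, e7, List.drop_eq_getElem_cons hj1, e8]
    simp only [List.take_succ_cons, List.drop_succ_cons, List.take_zero, List.take_nil,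
      List.nil_append, List.length_nil, Nat.sub_zero, List.drop_zero,
      if_neg (by omega : ¬ j + 1 < j), List.getElem?_cons_succ, List.getElem?_cons_zero,
      Option.getD_some, List.getElem?_eq_getElem hjl, List.drop_drop]
    simp only [List.cons_append, List.nil_append, List.append_assoc]
    have e9 : j + 2 + 0 = j + 1 + 1 := by omega
    have e10 : lnz - (j+1) = lnz - j - 1 := by omega
    have e11 : j + 2 + (lnz - j - 1 + 1 - 1) = lnz + 1 := by omega
    rw [e9, e10, e11]
  · rename_i l j h
    intro hj hlnz
    have hj' : j = lnz := by omega
    subst hj'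
    simp only [Nat.sub_self, List.take_zero, List.nil_append]
    rw [List.getD_eq_getElem l 0 hlnz, List.append_assoc]
    nth_rewrite 1 [← List.take_append_drop j l]
    rw [List.drop_eq_getElem_cons hlnz]
    simp

theorem shrink_step (l : List Int) (i lnz : Nat) (hi : i < lnz)
    (h0 : l.getD lnz 0 = 0) (h1 : l.getD (lnz - 1) 0 ≠ 0) :
    pvA_shrink l i lnz = lnz - 1 := by
  rw [pvA_shrink, dif_pos ⟨hi, h0⟩, pvA_shrink, dif_neg]
  intro hc
  exact h1 hc.2

theorem Lp_len (l : List Int) (i lnz : Nat) (hi : i < lnz) (h1 : lnz < l.length) :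
    (l.take i ++ (l.drop (i+1)).take (lnz - i) ++ (0:Int) :: l.drop (lnz+1)).length = l.length := by
  simp; omega

theorem Lp_take (l : List Int) (i lnz : Nat) (hi : i < lnz) (h1 : lnz < l.length) :
    (l.take i ++ (l.drop (i+1)).take (lnz - i) ++ (0:Int) :: l.drop (lnz+1)).take i = l.take i := by
  rw [List.append_assoc, List.take_append]
  simp [List.take_take]
  omega

theorem Lp_drop_take (l : List Int) (i lnz : Nat) (hi : i < lnz) (h1 : lnz < l.length) :
    ((l.take i ++ (l.drop (i+1)).take (lnz - i) ++ (0:Int) :: l.drop (lnz+1)).drop i).take (lnz - i)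
      = (l.drop (i+1)).take (lnz - i) := by
  rw [List.append_assoc, List.drop_append]
  have hP : (l.take i).length = i := by simp; omega
  rw [hP]
  simp only [Nat.sub_self, List.drop_zero, List.drop_eq_nil_of_le (le_of_eq hP), List.nil_append]
  rw [List.take_append]
  have hM : ((l.drop (i+1)).take (lnz - i)).length = lnz - i := by simp; omega
  rw [hM]
  simp [List.take_take]

theorem Lp_getD_lt (l : List Int) (i lnz k : Nat) (hk : k < i) (hi : i < lnz) (h1 : lnz < l.length) :
    (l.take i ++ (l.drop (i+1)).take (lnz - i) ++ (0:Int) :: l.drop (lnz+1)).getD k 0 = l.getD k 0 := by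
  rw [List.append_assoc]
  have hP : (l.take i).length = i := by simp; omega
  rw [List.getD_eq_getElem?_getD, List.getElem?_append_left (by omega), List.getElem?_take_of_lt hk,
    List.getD_eq_getElem?_getD]

theorem Lp_getD_lnz (l : List Int) (i lnz : Nat) (hi : i < lnz) (h1 : lnz < l.length) :
    (l.take i ++ (l.drop (i+1)).take (lnz - i) ++ (0:Int) :: l.drop (lnz+1)).getD lnz 0 = 0 := by
  have hP : (l.take i).length = i := by simp; omega
  have hM : ((l.drop (i+1)).take (lnz - i)).length = lnz - i := by simp; omega
  rw [List.append_assoc, List.getD_eq_getElem?_getD, List.getElem?_append_right (by omega), hP,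
    List.getElem?_append_right (by omega), hM]
  simp

theorem Lp_getD_pred (l : List Int) (i lnz : Nat) (hi : i < lnz) (h1 : lnz < l.length) :
    (l.take i ++ (l.drop (i+1)).take (lnz - i) ++ (0:Int) :: l.drop (lnz+1)).getD (lnz - 1) 0
      = l.getD lnz 0 := by
  have hP : (l.take i).length = i := by simp; omega
  have hM : ((l.drop (i+1)).take (lnz - i)).length = lnz - i := by simp; omega
  rw [List.append_assoc, List.getD_eq_getElem?_getD, List.getElem?_append_right (by omega), hP,
    List.getElem?_append_left (by omega), List.getElem?_take_of_lt (by omega)]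
  have hd : (l.drop (i+1))[lnz - 1 - i]? = l[(i+1) + (lnz - 1 - i)]? := List.getElem?_drop ..
  rw [hd]
  have e : (i+1) + (lnz - 1 - i) = lnz := by omega
  rw [e, List.getD_eq_getElem?_getD]

theorem loop_spec : ∀ (l : List Int) (i lnz : Nat),
    lnz < l.length → i ≤ lnz + 1 →
    (∀ k, k < i → l.getD k 0 ≠ 0) →
    (i ≤ lnz → l.getD lnz 0 ≠ 0) →
    (pvA_loop l i lnz).1.take ((pvA_loop l i lnz).2 + 1)
      = l.take i ++ ((l.drop i).take (lnz + 1 - i)).filter (fun x => x != 0) := by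
  intro l i lnz h1 h2 h3 h4
  revert h1 h2 h3 h4
  fun_induction pvA_loop l i lnz
  · -- zero branch, guard taken
    rename_i l i lnz hi hz hlt ih
    intro h1 h2 h3 h4
    have hilt : i < lnz := by
      rcases Nat.lt_or_ge i lnz with h | h
      · exact h
      · exfalso; have : i = lnz := by omega
        exact h4 (by omega) (this ▸ hz)
    have hb : pvA_bubble l i lnz
        = l.take i ++ (l.drop (i+1)).take (lnz - i) ++ (0:Int) :: l.drop (lnz+1) := by
      rw [bubble_spec l i lnz (by omega) h1, hz]
    have hs : pvA_shrink (pvA_bubble l i lnz) i lnz = lnz - 1 := by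
      rw [hb]
      exact shrink_step _ i lnz hilt (Lp_getD_lnz l i lnz hilt h1)
        (by rw [Lp_getD_pred l i lnz hilt h1]; exact h4 (by omega))
    rw [hs] at ih ⊢
    rw [hb] at ih ⊢
    rw [ih (by rw [Lp_len l i lnz hilt h1]; omega) (by omega)
      (fun k hk => by rw [Lp_getD_lt l i lnz k hk hilt h1]; exact h3 k hk)
      (fun hile => by rw [Lp_getD_pred l i lnz hilt h1]; exact h4 (by omega))]
    rw [Lp_take l i lnz hilt h1]
    have e1 : lnz - 1 + 1 - i = lnz - i := by omega
    rw [e1, Lp_drop_take l i lnz hilt h1]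
    -- right side: (l.drop i).take (lnz + 1 - i) = l[i] :: (l.drop (i+1)).take (lnz - i), l[i] = 0
    have hil : i < l.length := by omega
    have e2 : lnz + 1 - i = (lnz - i) + 1 := by omega
    rw [List.drop_eq_getElem_cons hil, e2, List.take_succ_cons, List.filter_cons]
    have hz' : l[i] = 0 := by rw [← List.getD_eq_getElem l 0 hil]; exact hz
    simp [hz']
  · -- zero branch, guard not taken: contradiction with shrink = lnz - 1 < lnz
    rename_i l i lnz hi hz hnlt
    intro h1 h2 h3 h4
    exfalso
    apply hnlt
    have hilt : i < lnz := by
      rcases Nat.lt_or_ge i lnz with h | h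
      · exact h
      · exfalso; have : i = lnz := by omega
        exact h4 (by omega) (this ▸ hz)
    have hb : pvA_bubble l i lnz
        = l.take i ++ (l.drop (i+1)).take (lnz - i) ++ (0:Int) :: l.drop (lnz+1) := by
      rw [bubble_spec l i lnz (by omega) h1, hz]
    rw [hb]
    rw [shrink_step _ i lnz hilt (Lp_getD_lnz l i lnz hilt h1)
      (by rw [Lp_getD_pred l i lnz hilt h1]; exact h4 (by omega))]
    omega
  · -- nonzero branch
    rename_i l i lnz hi hz ih
    intro h1 h2 h3 h4
    have hil : i < l.length := by omega
    rw [ih h1 (by omega) (fun k hk => by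
        rcases Nat.lt_or_ge k i with h | h
        · exact h3 k h
        · have : k = i := by omega
          rw [this]; exact hz) (fun h => h4 (by omega))]
    have e2 : lnz + 1 - i = (lnz - i) + 1 := by omega
    rw [List.drop_eq_getElem_cons hil, e2, List.take_succ_cons, List.filter_cons]
    have e3 : lnz + 1 - (i + 1) = lnz - i := by omega
    have hnz' : (l[i] != 0) = true := by
      have := hz; rw [List.getD_eq_getElem l 0 hil] at this; simpa using this
    have htake : List.take (i+1) l = List.take i l ++ [l[i]] := by
      rw [List.take_add_one, List.getElem?_eq_getElem hil]; rfl
    rw [htake, if_pos hnz', e3]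
    simp only [List.append_assoc, List.singleton_append]
  · -- exit
    rename_i l i lnz hi
    intro h1 h2 h3 h4
    have : i = lnz + 1 := by omega
    subst this
    simp


theorem A_of_clear (a : List Int) (h : pvA_shrink0 a ((a.length : Int) - 1) ≤ 0) :
    remove_zeroes_stable a = [] := by
  rw [remove_zeroes_stable, if_pos h]

theorem tail_zero_getD (a : List Int) (htz : ∀ x ∈ a.tail, x = 0) (k : Nat)
    (h1 : 1 ≤ k) (h2 : k < a.length) : a.getD k 0 = 0 := by
  rw [List.getD_eq_getElem a 0 h2]
  apply htz
  have hd : a.tail = a.drop 1 := by exact (List.drop_one).symm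
  have hk : k - 1 < (a.drop 1).length := by simp; omega
  have : (a.drop 1)[k-1] = a[k] := by
    rw [List.getElem_drop]
    congr 1
    omega
  rw [hd, ← this]
  exact List.getElem_mem hk

theorem shrink0_le_of_tail_zero (a : List Int) (htz : ∀ x ∈ a.tail, x = 0) :
    pvA_shrink0 a ((a.length : Int) - 1) ≤ 0 := by
  by_contra hpos
  rw [not_le] at hpos
  obtain ⟨hle, hne, -⟩ := shrink0_spec a ((a.length : Int) - 1)
  apply hne hpos
  have h2 : (pvA_shrink0 a ((a.length : Int) - 1)).toNat < a.length := by omega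
  exact tail_zero_getD a htz _ (by omega) h2

theorem A_empty_of_D (a : List Int) (hD : D_remove_zeroes_stable a) :
    remove_zeroes_stable a = [] :=
  A_of_clear a (shrink0_le_of_tail_zero a hD.2.2)

theorem zeros_from_shrink0 (a : List Int) (k : Nat)
    (hz : ∀ j : Int, pvA_shrink0 a ((a.length : Int) - 1) < j → j ≤ (a.length : Int) - 1 →
      a.getD j.toNat 0 = 0)
    (hk1 : pvA_shrink0 a ((a.length : Int) - 1) < (k : Int)) (hk2 : k < a.length) :
    a[k] = 0 := by
  have h2 := hz (k : Int) hk1 (by omega)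
  rw [Int.toNat_natCast] at h2
  rw [List.getD_eq_getElem a 0 hk2] at h2
  exact h2

theorem remove_zeroes_stable_main : ∀ (a : List Int),
    ¬ D_remove_zeroes_stable a → remove_zeroes_stable a = remove_zeroes_stable_alt a := by
  intro a hD
  obtain ⟨hle, hpos, hz⟩ := shrink0_spec a ((a.length : Int) - 1)
  by_cases hcl : pvA_shrink0 a ((a.length : Int) - 1) ≤ 0
  · -- A clears; every element of a is zero here, hence B's filter is empty too
    rcases a with _ | ⟨y, t⟩
    · rw [A_of_clear _ hcl]; rfl
    · rw [A_of_clear _ hcl]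
      symm
      rw [remove_zeroes_stable_alt, List.filter_eq_nil_iff]
      have htz : ∀ z ∈ t, z = 0 := by
        intro z hzmem
        obtain ⟨m, hm, hval⟩ := List.mem_iff_getElem.mp hzmem
        have hlt : m + 1 < (y :: t).length := by simpa using hm
        have h0 : (y :: t)[m+1] = 0 := zeros_from_shrink0 _ (m+1) hz (by push_cast; omega) hlt
        rw [← hval]
        simpa using h0
      have hy : y = 0 := by
        by_contra hy0
        exact hD ⟨by simp, by simpa using hy0, by simpa using htz⟩
      intro x hx
      rcases List.mem_cons.mp hx with h | h
      · simp [h, hy]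
      · simp [htz x h]
  · -- main loop runs; the result is the filter of the kept prefix, the dropped suffix is all zeros
    rw [not_le] at hcl
    have hane : a ≠ [] := by
      intro h
      rw [h] at hle hcl
      simp at hle hcl
      omega
    have hlen1 : 1 ≤ a.length := by
      cases a with
      | nil => exact absurd rfl hane
      | cons _ _ => simp
    have hrlen : (pvA_shrink0 a ((a.length : Int) - 1)).toNat < a.length := by omega
    rw [remove_zeroes_stable, if_neg (by omega)]
    rw [loop_spec a 0 (pvA_shrink0 a ((a.length : Int) - 1)).toNat hrlen (by omega)
      (fun k hk => absurd hk (by omega))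
      (fun _ => hpos hcl)]
    simp only [List.take_zero, List.drop_zero, List.nil_append, Nat.sub_zero]
    rw [remove_zeroes_stable_alt]
    conv_rhs => rw [← List.take_append_drop ((pvA_shrink0 a ((a.length : Int) - 1)).toNat + 1) a,
      List.filter_append]
    have hdz : (a.drop ((pvA_shrink0 a ((a.length : Int) - 1)).toNat + 1)).filter
        (fun x => x != 0) = [] := by
      rw [List.filter_eq_nil_iff]
      intro x hx
      obtain ⟨m, hm, hval⟩ := List.mem_iff_getElem.mp hx
      rw [List.getElem_drop] at hval
      have hlt : (pvA_shrink0 a ((a.length : Int) - 1)).toNat + 1 + m < a.length := by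
        simp at hm; omega
      have h0 : a[(pvA_shrink0 a ((a.length : Int) - 1)).toNat + 1 + m] = 0 :=
        zeros_from_shrink0 a _ hz (by push_cast; omega) hlt
      rw [h0] at hval
      simp [← hval]
    rw [hdz, List.append_nil]

-- ===== VERDICT (by name: the statement is the Claim_ definition above) =====
theorem remove_zeroes_stable_spec : Claim_unchanged_remove_zeroes_stable := by
  intro a _ hD
  exact remove_zeroes_stable_main a hD

theorem remove_zeroes_stable_changed : Claim_changed_remove_zeroes_stable := by
  unfold Claim_changed_remove_zeroes_stable
  refine ⟨by decide, by decide, ?_, by decide, by decide⟩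
  show remove_zeroes_stable [5, 0] = []
  simp [remove_zeroes_stable, pvA_shrink0]

theorem remove_zeroes_stable_tight : Claim_exact_remove_zeroes_stable := by
  intro a _ hD
  rw [A_empty_of_D a hD]
  obtain ⟨hne, hh, -⟩ := hD
  cases a with
  | nil => exact absurd rfl hne
  | cons x t =>
    simp only [List.headI] at hh
    have hx : (x != 0) = true := by simpa using hh
    simp [remove_zeroes_stable_alt, List.filter_cons, hx]
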